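-- pv_equiv track=rewrite | github.com/jiayuanz3/swebench_memory | swebench_memory/harness/new_languages/full_validation_multilingual_ruby.py | _test_in_filter
-- ===== SOURCE A (Python) =====
-- def _test_in_filter(test_name: str, filter_set: set) -> bool:
--     """Check if test matches any pattern in filter set."""
--     if test_name in filter_set:
--         return True
--
--     if '::' in test_name:
--         test_method = test_name.split('::')[-1]
--     else:
--         test_parts = test_name.split('.')
--         test_method = test_parts[-1] if test_parts else test_name
--
--     if test_method in filter_set:
--         return True
--
--     for pattern in filter_set:
--         pattern_parts = pattern.split('.')
--         pattern_method = pattern_parts[-1] if pattern_parts else pattern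
--
--         if test_method == pattern_method:
--             test_parts_dot = test_name.split('.')
--             if len(test_parts_dot) >= 2 and len(pattern_parts) >= 2:
--                 if test_parts_dot[-2] == pattern_parts[-2]:
--                     return True
--             else:
--                 return True
--
--     return False
-- ===== SOURCE B (Python) =====
-- def _test_in_filter(test_name: str, filter_set: set) -> bool:
--     """Check if test matches any pattern in filter set (index-based)."""
--     if test_name in filter_set:
--         return True
--
--     if '::' in test_name:
--         test_method = test_name.split('::')[-1]
--     else:
--         test_method = test_name.split('.')[-1]
--
--     if test_method in filter_set:
--         return True
--
--     # one pass: index the patterns by their method component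
--     wildcard = set()   # methods of patterns with no class component
--     classes = {}       # method -> set of class components of 2+-part patterns
--     for pattern in filter_set:
--         parts = pattern.split('.')
--         if len(parts) < 2:
--             wildcard.add(parts[-1])
--         else:
--             classes.setdefault(parts[-1], set()).add(parts[-2])
--
--     test_parts = test_name.split('.')
--     if len(test_parts) < 2:
--         return test_method in wildcard or test_method in classes
--     return test_method in wildcard or test_parts[-2] in classes.get(test_method, ())
-- ===== Notes on version B (the rewrite author's own statement) =====
-- stated objective: alternative
-- what changed: Replaces A's early-return scan over the patterns (re-splitting the test name on every method hit) with a one-pass index: a wildcard set of class-less pattern methods and a dict mapping each method to the set of its class components, answered by a single lookup.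
import Mathlib
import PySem

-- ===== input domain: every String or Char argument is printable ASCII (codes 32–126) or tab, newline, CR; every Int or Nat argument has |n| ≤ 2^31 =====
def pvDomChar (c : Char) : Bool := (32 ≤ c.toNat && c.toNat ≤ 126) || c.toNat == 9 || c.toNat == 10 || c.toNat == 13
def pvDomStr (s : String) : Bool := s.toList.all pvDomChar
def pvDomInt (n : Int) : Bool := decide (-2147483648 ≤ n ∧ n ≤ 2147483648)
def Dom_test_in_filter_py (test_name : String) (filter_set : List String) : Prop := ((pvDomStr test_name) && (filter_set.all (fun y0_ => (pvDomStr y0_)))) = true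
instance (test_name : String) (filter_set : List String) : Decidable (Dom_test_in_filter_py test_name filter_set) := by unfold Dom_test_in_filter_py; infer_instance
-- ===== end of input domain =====

-- B replaces A's early-return scan over the patterns with a one-pass index (wildcard set + method→classes dict) answered by a single lookup; alternative structure, same asymptotic cost.

-- shared wrapper for Python's s.split(sep) with a non-empty literal sep (split? is `some` there)
def pySplit (s sep : String) : List String := (PySem.Str.split? s sep).getD []

-- ===== PORT A =====
-- the `for pattern in filter_set:` loop with its early returns
def test_in_filter_loopA (test_name test_method : String) : List String → Bool
  | [] => false
  | pattern :: rest =>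
    let pattern_parts := pySplit pattern "."
    -- `pattern_parts[-1] if pattern_parts else pattern` (split is never empty, so [-1] is total)
    let pattern_method := if pattern_parts ≠ [] then PySem.List.pyGetD pattern_parts (-1) "" else pattern
    if test_method == pattern_method then
      let test_parts_dot := pySplit test_name "."
      if 2 ≤ test_parts_dot.length ∧ 2 ≤ pattern_parts.length then
        if PySem.List.pyGetD test_parts_dot (-2) "" == PySem.List.pyGetD pattern_parts (-2) "" then
          true
        else test_in_filter_loopA test_name test_method rest
      else true
    else test_in_filter_loopA test_name test_method rest

def test_in_filter_py (test_name : String) (filter_set : List String) : Bool :=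
  if filter_set.contains test_name then true
  else
    let test_method :=
      if PySem.Str.isIn "::" test_name then
        PySem.List.pyGetD (pySplit test_name "::") (-1) ""   -- [-1] on a split result: never empty
      else
        let test_parts := pySplit test_name "."
        if test_parts ≠ [] then PySem.List.pyGetD test_parts (-1) "" else test_name
    if filter_set.contains test_method then true
    else test_in_filter_loopA test_name test_method filter_set

-- ===== PORT B =====
-- loop body of B's index-building pass: wildcard set + method → set of class components
def pvIndexStep (acc : PySem.Set String × PySem.Dict String (PySem.Set String)) (pattern : String) :
    PySem.Set String × PySem.Dict String (PySem.Set String) :=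
  let parts := pySplit pattern "."
  if parts.length < 2 then
    (PySem.Set.add acc.1 (PySem.List.pyGetD parts (-1) ""), acc.2)
  else
    (acc.1, acc.2.modify (PySem.List.pyGetD parts (-1) "") PySem.Set.empty
      (fun s => PySem.Set.add s (PySem.List.pyGetD parts (-2) "")))

def test_in_filter_py_alt (test_name : String) (filter_set : List String) : Bool :=
  if filter_set.contains test_name then true
  else
    let test_method :=
      if PySem.Str.isIn "::" test_name then PySem.List.pyGetD (pySplit test_name "::") (-1) ""
      else PySem.List.pyGetD (pySplit test_name ".") (-1) ""
    if filter_set.contains test_method then true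
    else
      let idx := filter_set.foldl pvIndexStep (PySem.Set.empty, PySem.Dict.empty)
      let test_parts := pySplit test_name "."
      if test_parts.length < 2 then
        PySem.Set.contains idx.1 test_method || idx.2.contains test_method
      else
        PySem.Set.contains idx.1 test_method ||
          PySem.Set.contains (idx.2.getD test_method PySem.Set.empty)
            (PySem.List.pyGetD test_parts (-2) "")

-- ===== PRECONDITION & SPEC =====
def Spec_test_in_filter_py (test_name : String) (filter_set : List String) (out : Bool) : Prop := out = test_in_filter_py_alt test_name filter_set
instance (test_name : String) (filter_set : List String) (out : Bool) : Decidable (Spec_test_in_filter_py test_name filter_set out) := by unfold Spec_test_in_filter_py; infer_instance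

-- ===== CLAIM (what is proved, stated in full; the proofs are below) =====
def Claim_equal_test_in_filter_py : Prop := ∀ (test_name : String) (filter_set : List String), Dom_test_in_filter_py test_name filter_set → Spec_test_in_filter_py test_name filter_set (test_in_filter_py test_name filter_set)

-- ===== LEMMAS AND PROOFS =====

-- the method (last '.'-component) and class (second-to-last) of a pattern
def pvMeth (p : String) : String := PySem.List.pyGetD (pySplit p ".") (-1) ""
def pvCls (p : String) : String := PySem.List.pyGetD (pySplit p ".") (-2) ""

-- what one iteration of A's loop tests
def pvHit (test_name test_method : String) (p : String) : Bool :=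
  test_method == pvMeth p &&
    (if 2 ≤ (pySplit test_name ".").length ∧ 2 ≤ (pySplit p ".").length then
       PySem.List.pyGetD (pySplit test_name ".") (-2) "" == pvCls p
     else true)

theorem splitOn_go_ne_nil (sep : List Char) (fuel : Nat) (l cur : List Char)
    (acc : List (List Char)) : PySem.Chars.splitOn.go sep fuel l cur acc ≠ [] := by
  induction fuel generalizing l cur acc with
  | zero => rw [PySem.Chars.splitOn.go.eq_def]; simp
  | succ n ih =>
    rw [PySem.Chars.splitOn.go.eq_def]
    rcases l with _ | ⟨c, rest⟩
    · simp
    · dsimp only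
      split
      · exact ih _ _ _
      · exact ih _ _ _

theorem pySplit_ne_nil (s sep : String) (h : sep.toList ≠ []) : pySplit s sep ≠ [] := by
  unfold pySplit PySem.Str.split?
  rw [PySem.Chars.split?.eq_def]
  have hsep : sep.toList.isEmpty = false := by
    cases hl : sep.toList with
    | nil => exact absurd hl h
    | cons a as => rfl
  rw [hsep]
  simp only [Bool.false_eq_true, if_false, Option.map_some, Option.getD_some]
  unfold PySem.Chars.splitOn
  intro hc
  exact splitOn_go_ne_nil _ _ _ _ _ (List.map_eq_nil_iff.mp hc)

theorem beq_comm' (a b : String) : (a == b) = (b == a) := by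
  by_cases h : a = b
  · subst h; rfl
  · rw [beq_eq_false_iff_ne.mpr h, beq_eq_false_iff_ne.mpr (Ne.symm h)]

theorem set_contains_add (s : PySem.Set String) (y x : String) :
    PySem.Set.contains (PySem.Set.add s y) x = (PySem.Set.contains s x || (y == x)) := by
  by_cases hs : x ∈ s
  · rw [(PySem.Set.contains_iff _ _).mpr hs,
        (PySem.Set.contains_iff _ _).mpr ((PySem.Set.mem_add _ _ _).mpr (Or.inl hs))]
    simp
  · have h1 : PySem.Set.contains s x = false :=
      Bool.eq_false_iff.mpr (fun hc => hs ((PySem.Set.contains_iff _ _).mp hc))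
    rw [h1, Bool.false_or]
    by_cases hxy : y = x
    · subst hxy
      rw [(PySem.Set.contains_iff _ _).mpr ((PySem.Set.mem_add _ _ _).mpr (Or.inr rfl))]
      exact (beq_self_eq_true y).symm
    · have h2 : PySem.Set.contains (PySem.Set.add s y) x = false := by
        refine Bool.eq_false_iff.mpr (fun hc => ?_)
        rcases (PySem.Set.mem_add _ _ _).mp ((PySem.Set.contains_iff _ _).mp hc) with hm | hm
        · exact hs hm
        · exact hxy hm.symm
      rw [h2]
      exact (beq_eq_false_iff_ne.mpr hxy).symm

theorem any_congr'' (l : List String) (f g : String → Bool) (h : ∀ x ∈ l, f x = g x) :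
    l.any f = l.any g := by
  induction l with
  | nil => rfl
  | cons a as ih =>
    simp only [List.any_cons]
    rw [h a (by simp), ih (fun x hx => h x (by simp [hx]))]

theorem any_or_split (l : List String) (f g : String → Bool) :
    (l.any f || l.any g) = l.any (fun x => f x || g x) := by
  induction l with
  | nil => rfl
  | cons x xs ih =>
    simp only [List.any_cons, ← ih]
    cases f x <;> cases g x <;> simp

theorem loopA_eq_any (tn tm : String) (l : List String) :
    test_in_filter_loopA tn tm l = l.any (pvHit tn tm) := by
  induction l with
  | nil => rfl
  | cons p rest ih =>
    rw [test_in_filter_loopA, List.any_cons, ← ih]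
    rw [if_pos (pySplit_ne_nil p "." (by decide))]
    unfold pvHit pvMeth pvCls
    by_cases hm : tm == PySem.List.pyGetD (pySplit p ".") (-1) ""
    · rw [if_pos hm]
      simp only [hm, Bool.true_and]
      split
      · split <;> simp_all
      · simp
    · rw [if_neg (by simpa using hm)]
      simp [Bool.eq_false_iff.mpr hm]

theorem fold_wildcard_contains (l : List String)
    (acc : PySem.Set String × PySem.Dict String (PySem.Set String)) (x : String) :
    PySem.Set.contains (l.foldl pvIndexStep acc).1 x =
      (PySem.Set.contains acc.1 x ||
        l.any (fun p => decide ((pySplit p ".").length < 2) && (pvMeth p == x))) := by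
  induction l generalizing acc with
  | nil => simp
  | cons p rest ih =>
    rw [List.foldl_cons, List.any_cons, ih]
    by_cases h : (pySplit p ".").length < 2
    · have hstep : pvIndexStep acc p = (PySem.Set.add acc.1 (pvMeth p), acc.2) := by
        unfold pvIndexStep; rw [if_pos h]; rfl
      rw [hstep]
      dsimp only
      rw [set_contains_add, decide_eq_true h, Bool.true_and, Bool.or_assoc,
          Bool.or_left_comm]
    · have hstep : pvIndexStep acc p =
          (acc.1, acc.2.modify (pvMeth p) PySem.Set.empty
            (fun s => PySem.Set.add s (pvCls p))) := by
        unfold pvIndexStep; rw [if_neg h]; rfl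
      rw [hstep]
      dsimp only
      rw [decide_eq_false h, Bool.false_and, Bool.false_or]

theorem fold_dict_contains (l : List String)
    (acc : PySem.Set String × PySem.Dict String (PySem.Set String)) (x : String) :
    (l.foldl pvIndexStep acc).2.contains x =
      (acc.2.contains x ||
        l.any (fun p => decide (2 ≤ (pySplit p ".").length) && (pvMeth p == x))) := by
  induction l generalizing acc with
  | nil => simp
  | cons p rest ih =>
    rw [List.foldl_cons, List.any_cons, ih]
    by_cases h : (pySplit p ".").length < 2
    · have hstep : pvIndexStep acc p = (PySem.Set.add acc.1 (pvMeth p), acc.2) := by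
        unfold pvIndexStep; rw [if_pos h]; rfl
      rw [hstep]
      dsimp only
      rw [decide_eq_false (Nat.not_le.mpr h), Bool.false_and, Bool.false_or]
    · have hstep : pvIndexStep acc p =
          (acc.1, acc.2.modify (pvMeth p) PySem.Set.empty
            (fun s => PySem.Set.add s (pvCls p))) := by
        unfold pvIndexStep; rw [if_neg h]; rfl
      rw [hstep]
      dsimp only
      rw [PySem.Dict.contains_modify, beq_comm' x (pvMeth p),
          decide_eq_true (Nat.le_of_not_lt h), Bool.true_and, Bool.or_assoc,
          Bool.or_left_comm]

theorem fold_dict_getD_contains (l : List String)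
    (acc : PySem.Set String × PySem.Dict String (PySem.Set String)) (x y : String) :
    PySem.Set.contains ((l.foldl pvIndexStep acc).2.getD x PySem.Set.empty) y =
      (PySem.Set.contains (acc.2.getD x PySem.Set.empty) y ||
        l.any (fun p => decide (2 ≤ (pySplit p ".").length) && (pvMeth p == x) && (pvCls p == y))) := by
  induction l generalizing acc with
  | nil => simp
  | cons p rest ih =>
    rw [List.foldl_cons, List.any_cons, ih]
    by_cases h : (pySplit p ".").length < 2
    · have hstep : pvIndexStep acc p = (PySem.Set.add acc.1 (pvMeth p), acc.2) := by
        unfold pvIndexStep; rw [if_pos h]; rfl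
      rw [hstep]
      dsimp only
      rw [decide_eq_false (Nat.not_le.mpr h), Bool.false_and, Bool.false_and, Bool.false_or]
    · have hstep : pvIndexStep acc p =
          (acc.1, acc.2.modify (pvMeth p) PySem.Set.empty
            (fun s => PySem.Set.add s (pvCls p))) := by
        unfold pvIndexStep; rw [if_neg h]; rfl
      rw [hstep]
      dsimp only
      by_cases hx : x = pvMeth p
      · subst hx
        rw [PySem.Dict.getD_modify_self, set_contains_add,
            decide_eq_true (Nat.le_of_not_lt h), Bool.true_and, beq_self_eq_true,
            Bool.true_and, Bool.or_assoc, Bool.or_left_comm]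
      · rw [PySem.Dict.getD_modify_of_ne _ _ _ hx,
            beq_eq_false_iff_ne.mpr (fun hc => hx hc.symm), Bool.and_false,
            Bool.false_and, Bool.false_or]

-- B's lookup tail computes exactly "some pattern hits", which is A's loop
theorem tail_eq (tn tm : String) (fs : List String) :
    test_in_filter_loopA tn tm fs =
      (if (pySplit tn ".").length < 2 then
         PySem.Set.contains (fs.foldl pvIndexStep (PySem.Set.empty, PySem.Dict.empty)).1 tm ||
           (fs.foldl pvIndexStep (PySem.Set.empty, PySem.Dict.empty)).2.contains tm
       else
         PySem.Set.contains (fs.foldl pvIndexStep (PySem.Set.empty, PySem.Dict.empty)).1 tm ||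
           PySem.Set.contains
             ((fs.foldl pvIndexStep (PySem.Set.empty, PySem.Dict.empty)).2.getD tm PySem.Set.empty)
             (PySem.List.pyGetD (pySplit tn ".") (-2) "")) := by
  rw [loopA_eq_any, fold_wildcard_contains, fold_dict_contains, fold_dict_getD_contains]
  have he1 : PySem.Set.contains
      ((PySem.Set.empty : PySem.Set String),
        (PySem.Dict.empty : PySem.Dict String (PySem.Set String))).1 tm = false := rfl
  have he2 : ((PySem.Set.empty : PySem.Set String),
      (PySem.Dict.empty : PySem.Dict String (PySem.Set String))).2.contains tm = false := rfl
  have he3 : PySem.Set.contains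
      (((PySem.Set.empty : PySem.Set String),
        (PySem.Dict.empty : PySem.Dict String (PySem.Set String))).2.getD tm PySem.Set.empty)
      (PySem.List.pyGetD (pySplit tn ".") (-2) "") = false := rfl
  rw [he1, he2, he3]
  simp only [Bool.false_or]
  by_cases ht : (pySplit tn ".").length < 2
  · rw [if_pos ht, any_or_split]
    refine any_congr'' _ _ _ (fun p _ => ?_)
    dsimp only
    unfold pvHit
    rw [if_neg (by omega : ¬ (2 ≤ (pySplit tn ".").length ∧ 2 ≤ (pySplit p ".").length)),
        Bool.and_true, beq_comm' tm (pvMeth p)]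
    by_cases hp : (pySplit p ".").length < 2
    · rw [decide_eq_true hp, Bool.true_and,
          decide_eq_false (Nat.not_le.mpr hp), Bool.false_and, Bool.or_false]
    · rw [decide_eq_false hp, Bool.false_and, Bool.false_or,
          decide_eq_true (Nat.le_of_not_lt hp), Bool.true_and]
  · rw [if_neg ht, any_or_split]
    refine any_congr'' _ _ _ (fun p _ => ?_)
    dsimp only
    unfold pvHit
    by_cases hp : (pySplit p ".").length < 2
    · rw [if_neg (by omega : ¬ (2 ≤ (pySplit tn ".").length ∧ 2 ≤ (pySplit p ".").length)),
          Bool.and_true, beq_comm' tm (pvMeth p), decide_eq_true hp, Bool.true_and,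
          decide_eq_false (Nat.not_le.mpr hp), Bool.false_and, Bool.false_and, Bool.or_false]
    · rw [if_pos ⟨Nat.le_of_not_lt ht, Nat.le_of_not_lt hp⟩,
          beq_comm' tm (pvMeth p),
          beq_comm' (PySem.List.pyGetD (pySplit tn ".") (-2) "") (pvCls p),
          decide_eq_false hp, Bool.false_and, Bool.false_or,
          decide_eq_true (Nat.le_of_not_lt hp), Bool.true_and]

theorem main_eq (tn : String) (fs : List String) :
    test_in_filter_py tn fs = test_in_filter_py_alt tn fs := by
  unfold test_in_filter_py test_in_filter_py_alt
  dsimp only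
  rw [if_pos (pySplit_ne_nil tn "." (by decide))]
  split
  · rfl
  · split
    · split
      · rfl
      · exact tail_eq tn _ fs
    · split
      · rfl
      · exact tail_eq tn _ fs

-- ===== VERDICT (by name: the statement is the Claim_ definition above) =====
theorem test_in_filter_py_spec : Claim_equal_test_in_filter_py := by
  intro tn fs _
  unfold Spec_test_in_filter_py
  exact main_eq tn fs
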